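-- pv_equiv track=rewrite | github.com/minseokim12/algo-study | leetcode/914/914_colinkang.py | hasGroupsSizeX2
-- ===== SOURCE A (Python) =====
-- from typing import List
-- from typing import collections
--
-- def hasGroupsSizeX2(deck: List[int]) -> bool:
--     count = collections.Counter(deck)
--     mini = min(count.values())
--
--     if mini < 2:
--         return False
--     for i in range(mini+1,1,-1):
--         res = all(value % i ==0 for value in count.values())
--         if res: return True
--     return False
-- ===== SOURCE B (Python) =====
-- from collections import Counter
--
--
-- def hasGroupsSizeX2(deck):
--     # GCD of all multiplicities; a valid group size X >= 2 exists iff gcd >= 2.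
--     g = 0
--     for c in Counter(deck).values():
--         while c:
--             g, c = c, g % c
--     return g >= 2
-- ===== Notes on version B (the rewrite author's own statement) =====
-- stated objective: alternative
-- what changed: Instead of trying every candidate group size from min(count)+1 down to 2 and scanning all counts for each, B folds the Euclidean algorithm over the counts once and tests gcd >= 2.
-- crash fix: On the empty deck A raises ValueError (min() of an empty sequence); B returns False. — e.g. on hasGroupsSizeX2([]): A raises ValueError, B returns false
import Mathlib
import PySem

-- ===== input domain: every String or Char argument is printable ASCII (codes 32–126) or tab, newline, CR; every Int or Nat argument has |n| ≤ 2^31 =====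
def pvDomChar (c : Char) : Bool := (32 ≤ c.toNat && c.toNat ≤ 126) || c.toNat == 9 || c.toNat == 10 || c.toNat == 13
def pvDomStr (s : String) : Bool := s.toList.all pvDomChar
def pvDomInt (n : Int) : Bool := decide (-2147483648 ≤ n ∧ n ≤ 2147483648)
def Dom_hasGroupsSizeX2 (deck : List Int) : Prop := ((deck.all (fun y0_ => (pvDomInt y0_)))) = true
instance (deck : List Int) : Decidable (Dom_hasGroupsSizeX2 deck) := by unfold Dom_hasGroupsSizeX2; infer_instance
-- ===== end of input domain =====

-- B replaces A's countdown search over candidate group sizes by a single Euclidean-gcd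
-- fold over the multiplicities (objective: alternative algorithm). On the empty deck A
-- raises ValueError; Pre_ excludes it and B returns False there (see Raises_).


-- ===== PORT A =====
def hasGroupsSizeX2 (deck : List Int) : Bool :=
  let count := PySem.Dict.counter deck
  match PySem.List.min? count.values (fun v => v) with
  | none => false  -- Python raises ValueError here (min of an empty sequence); excluded by Pre_
  | some mini =>
    if mini < 2 then false
    else
      (PySem.List.pyRange (mini + 1) 1 (-1)).any (fun i =>
        count.values.all (fun value => PySem.Int.mod value i == 0))

-- ===== PORT B =====
-- termination fact for B's inner `while c: g, c = c, g % c` loop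
theorem pyGcdLoop_dec (g c : Int) (h : ¬ c = 0) : (PySem.Int.mod g c).natAbs < c.natAbs := by
  rcases lt_or_gt_of_ne h with hn | hp
  · have h1 : g.fmod c = g % c + if 0 ≤ c ∨ c ∣ g then 0 else c := Int.fmod_eq_emod
    have h2 : g % c = g % (-c) := (Int.emod_neg g c).symm
    have h3 : 0 ≤ g % (-c) := Int.emod_nonneg g (by omega)
    have h4 : g % (-c) < -c := Int.emod_lt_of_pos g (by omega)
    simp only [PySem.Int.mod]
    split at h1 <;> omega
  · have h3 : 0 ≤ g.fmod c := Int.fmod_nonneg_of_pos g hp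
    have h4 : g.fmod c < c := Int.fmod_lt_of_pos g hp
    simp only [PySem.Int.mod]
    omega

-- B's inner `while c: g, c = c, g % c`
def pyGcdLoop (g c : Int) : Int :=
  if h : c = 0 then g else pyGcdLoop c (PySem.Int.mod g c)
termination_by c.natAbs
decreasing_by exact pyGcdLoop_dec g c h

def hasGroupsSizeX2_alt (deck : List Int) : Bool :=
  let g := (PySem.Dict.counter deck).values.foldl pyGcdLoop 0
  decide (2 ≤ g)

-- ===== PRECONDITION & SPEC =====
-- Pre_ excludes only the empty deck, on which A raises ValueError (min() of an empty sequence).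
def Pre_hasGroupsSizeX2 (deck : List Int) : Prop := deck ≠ []
instance (deck : List Int) : Decidable (Pre_hasGroupsSizeX2 deck) := by unfold Pre_hasGroupsSizeX2; infer_instance
def pvWitness_hasGroupsSizeX2 : List Int := [1, 1]

-- On the empty deck A raises ValueError (min() arg is an empty sequence); B returns False.
def Raises_hasGroupsSizeX2 (deck : List Int) : Prop := deck = []
instance (deck : List Int) : Decidable (Raises_hasGroupsSizeX2 deck) := by unfold Raises_hasGroupsSizeX2; infer_instance
def pvRaiseWitness_hasGroupsSizeX2 : List Int := []
def pvRaiseWitnessOut_hasGroupsSizeX2 : Bool := false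

def Spec_hasGroupsSizeX2 (deck : List Int) (out : Bool) : Prop := out = hasGroupsSizeX2_alt deck
instance (deck : List Int) (out : Bool) : Decidable (Spec_hasGroupsSizeX2 deck out) := by unfold Spec_hasGroupsSizeX2; infer_instance

-- ===== CLAIM (what is proved, stated in full; the proofs are below) =====
def Claim_equal_hasGroupsSizeX2 : Prop := ∀ (deck : List Int), Dom_hasGroupsSizeX2 deck → Pre_hasGroupsSizeX2 deck → Spec_hasGroupsSizeX2 deck (hasGroupsSizeX2 deck)
def Claim_raises_hasGroupsSizeX2 : Prop := (∀ (deck : List Int), Dom_hasGroupsSizeX2 deck → Raises_hasGroupsSizeX2 deck → ¬ Pre_hasGroupsSizeX2 deck) ∧ (Dom_hasGroupsSizeX2 (pvRaiseWitness_hasGroupsSizeX2) ∧ Raises_hasGroupsSizeX2 (pvRaiseWitness_hasGroupsSizeX2) ∧ hasGroupsSizeX2_alt (pvRaiseWitness_hasGroupsSizeX2) = pvRaiseWitnessOut_hasGroupsSizeX2)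

-- ===== LEMMAS AND PROOFS =====

-- an Int d dividing both arguments divides their (Nat-valued) gcd, as an Int
theorem int_dvd_gcd_cast (d a b : Int) (ha : d ∣ a) (hb : d ∣ b) : d ∣ ((Int.gcd a b : Nat) : Int) := by
  have h1 : (d.natAbs : Int) ∣ a := (Int.natAbs_dvd).2 ha
  have h2 : (d.natAbs : Int) ∣ b := (Int.natAbs_dvd).2 hb
  have h3 : d.natAbs ∣ Int.gcd a b := Int.dvd_gcd h1 h2
  exact (Int.natAbs_dvd).1 (Int.natCast_dvd_natCast.2 h3)

-- Euclid's step: gcd c (g % c) = gcd g c (Lean emod)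
theorem gcd_step (g c : Int) : Int.gcd c (g % c) = Int.gcd g c := by
  have hg : c * (g / c) + g % c = g := by have := Int.emod_add_ediv g c; linarith
  apply Nat.dvd_antisymm
  · apply Int.dvd_gcd
    · have h1 : ((Int.gcd c (g % c) : Nat) : Int) ∣ c := Int.gcd_dvd_left c (g % c)
      have h2 : ((Int.gcd c (g % c) : Nat) : Int) ∣ g % c := Int.gcd_dvd_right c (g % c)
      have := dvd_add (Dvd.dvd.mul_right h1 (g / c)) h2
      rwa [hg] at this
    · exact Int.gcd_dvd_left c (g % c)
  · apply Int.dvd_gcd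
    · exact Int.gcd_dvd_right g c
    · have h1 : ((Int.gcd g c : Nat) : Int) ∣ g := Int.gcd_dvd_left g c
      have h2 : ((Int.gcd g c : Nat) : Int) ∣ c := Int.gcd_dvd_right g c
      have := dvd_sub h1 (Dvd.dvd.mul_right h2 (g / c))
      have heq : g - c * (g / c) = g % c := by omega
      rwa [heq] at this

theorem pyGcdLoop_eq (g c : Int) : 0 ≤ g → 0 ≤ c → pyGcdLoop g c = ((Int.gcd g c : Nat) : Int) := by
  induction g, c using pyGcdLoop.induct with
  | case1 g =>
    intro hg _
    rw [pyGcdLoop]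
    simp [Int.natAbs_of_nonneg hg]
  | case2 g c h ih =>
    intro _ hc0
    have hcpos : 0 < c := lt_of_le_of_ne hc0 (Ne.symm h)
    rw [pyGcdLoop, dif_neg h]
    rw [ih hc0 (by simpa only [PySem.Int.mod] using Int.fmod_nonneg_of_pos g hcpos)]
    rw [PySem.Int.mod_eq_emod_of_pos hcpos, gcd_step]

def gfold (vs : List Int) (g : Int) : Int := vs.foldl (fun a v => ((Int.gcd a v : Nat) : Int)) g

theorem foldl_pyGcdLoop (vs : List Int) (g : Int) (hg : 0 ≤ g) (hvs : ∀ v ∈ vs, 0 ≤ v) :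
    vs.foldl pyGcdLoop g = gfold vs g := by
  induction vs generalizing g with
  | nil => rfl
  | cons v t ih =>
    have hv : 0 ≤ v := hvs v (by simp)
    simp only [List.foldl_cons, gfold] at *
    rw [pyGcdLoop_eq g v hg hv]
    exact ih _ (by positivity) (fun w hw => hvs w (by simp [hw]))

theorem dvd_gfold (vs : List Int) (g d : Int) : d ∣ gfold vs g ↔ (d ∣ g ∧ ∀ v ∈ vs, d ∣ v) := by
  induction vs generalizing g with
  | nil => simp [gfold]
  | cons v t ih =>
    simp only [gfold, List.foldl_cons] at *
    rw [ih]
    constructor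
    · rintro ⟨h1, h2⟩
      have hl : d ∣ g := dvd_trans h1 (Int.gcd_dvd_left g v)
      have hr : d ∣ v := dvd_trans h1 (Int.gcd_dvd_right g v)
      refine ⟨hl, fun w hw => ?_⟩
      rcases List.mem_cons.1 hw with h | h
      · exact h ▸ hr
      · exact h2 w h
    · rintro ⟨h1, h2⟩
      exact ⟨int_dvd_gcd_cast d g v h1 (h2 v (by simp)),
        fun w hw => h2 w (List.mem_cons_of_mem v hw)⟩

theorem gfold_nonneg (vs : List Int) (g : Int) (hg : 0 ≤ g) : 0 ≤ gfold vs g := by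
  induction vs generalizing g with
  | nil => exact hg
  | cons v t ih => exact ih _ (by positivity)

theorem values_counter_eq (deck : List Int) :
    (PySem.Dict.counter deck).values = (PySem.Set.ofList deck).map (fun k => ((deck.count k : Nat) : Int)) := by
  have h := PySem.Dict.items_counter deck
  simp only [PySem.Dict.values, h, List.map_map]
  rfl

theorem hasGroupsSizeX2_spec : Claim_equal_hasGroupsSizeX2 := by
  intro deck _ hpre
  unfold Spec_hasGroupsSizeX2
  set vs := (PySem.Dict.counter deck).values with hvs
  have hone : ∀ v ∈ vs, 1 ≤ v := by
    intro v hv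
    rw [hvs, values_counter_eq] at hv
    obtain ⟨k, hk, rfl⟩ := List.mem_map.1 hv
    have hkdeck : k ∈ deck := (PySem.Set.mem_ofList _ _).1 hk
    have : 0 < deck.count k := List.count_pos_iff.2 hkdeck
    exact_mod_cast this
  have hnn : ∀ v ∈ vs, 0 ≤ v := fun v hv => le_trans (by norm_num) (hone v hv)
  have hvne : vs ≠ [] := by
    cases deck with
    | nil => exact absurd rfl hpre
    | cons d t =>
      rw [hvs, values_counter_eq]
      have hd : d ∈ PySem.Set.ofList (d :: t) := (PySem.Set.mem_ofList _ _).2 (by simp)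
      intro hnil
      rw [List.map_eq_nil_iff] at hnil
      rw [hnil] at hd
      simp at hd
  set G := gfold vs 0 with hG
  have hB : hasGroupsSizeX2_alt deck = decide (2 ≤ G) := by
    simp only [hasGroupsSizeX2_alt, ← hvs, foldl_pyGcdLoop vs 0 le_rfl hnn, ← hG]
  have hGnn : 0 ≤ G := gfold_nonneg vs 0 le_rfl
  have hGdvd : ∀ v ∈ vs, G ∣ v := ((dvd_gfold vs 0 G).1 dvd_rfl).2
  cases hm : PySem.List.min? vs (fun v => v) with
  | none => exact absurd ((PySem.List.min?_eq_none_iff vs _).1 hm) hvne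
  | some mini =>
    have hmem : mini ∈ vs := PySem.List.min?_mem hm
    have hmin1 : 1 ≤ mini := hone mini hmem
    have hGmini : G ∣ mini := hGdvd mini hmem
    have hG1 : 1 ≤ G := by
      rcases eq_or_lt_of_le hGnn with h0 | h0
      · exfalso; rw [← h0] at hGmini; have := zero_dvd_iff.1 hGmini; omega
      · omega
    have hA : hasGroupsSizeX2 deck =
        (if mini < 2 then false
         else (PySem.List.pyRange (mini + 1) 1 (-1)).any (fun i =>
           vs.all (fun value => PySem.Int.mod value i == 0))) := by
      simp only [hasGroupsSizeX2, ← hvs, hm]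
    rw [hA, hB]
    by_cases h2 : 2 ≤ G
    · have hGm : G ≤ mini := Int.le_of_dvd (by omega) hGmini
      rw [if_neg (by omega)]
      simp only [h2, decide_true]
      rw [List.any_eq_true]
      refine ⟨G, (PySem.List.mem_pyRange_neg_one).2 ⟨by omega, by omega⟩, ?_⟩
      rw [List.all_eq_true]
      intro v hv
      simpa [beq_iff_eq, PySem.Int.mod_eq_zero_iff_dvd] using hGdvd v hv
    · have hGe1 : G = 1 := by omega
      rw [decide_eq_false h2]
      split_ifs with hlt
      · rfl
      · rw [List.any_eq_false]
        intro i hi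
        have hi2 : 1 < i := ((PySem.List.mem_pyRange_neg_one).1 hi).1
        intro hall
        rw [List.all_eq_true] at hall
        have hidvd : ∀ v ∈ vs, i ∣ v := by
          intro v hv
          have := hall v hv
          simpa [beq_iff_eq, PySem.Int.mod_eq_zero_iff_dvd] using this
        have : i ∣ G := (dvd_gfold vs 0 i).2 ⟨dvd_zero i, hidvd⟩
        rw [hGe1] at this
        have := Int.le_of_dvd (by omega) this
        omega

@[simp]
theorem hasGroupsSizeX2_raises : Claim_raises_hasGroupsSizeX2 := by
  unfold Claim_raises_hasGroupsSizeX2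
  exact ⟨fun deck _ hr => by simp [Raises_hasGroupsSizeX2] at hr; simp [Pre_hasGroupsSizeX2, hr], by decide⟩
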